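-- pv_equiv track=rewrite | github.com/OmarHackerPro/news.avild | scripts/detect_cluster_merges.py | _entities_from_signature
-- ===== SOURCE A (Python) =====
-- def _entities_from_signature(sig: dict) -> list[dict]:
--     entities = []
--     for cve in sig.get("cve_ids") or []:
--         entities.append({"type": "cve", "normalized_key": cve})
--     for alias in sig.get("vuln_aliases") or []:
--         entities.append({"type": "vuln_alias", "normalized_key": alias})
--     for campaign in sig.get("campaign_names") or []:
--         entities.append({"type": "campaign", "normalized_key": campaign})
--     for product in sig.get("affected_products") or []:
--         entities.append({"type": "product", "normalized_key": product})
--     for actor in sig.get("primary_actors") or []: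
--         entities.append({"type": "actor", "normalized_key": actor})
--     return entities
-- ===== SOURCE B (Python) =====
-- def _entities_from_signature(sig: dict) -> list[dict]:
--     # Single pass over the signature's own items, dispatching each recognized
--     # field into a typed bucket; then one emission pass over the buckets.
--     label = {
--         "cve_ids": "cve",
--         "vuln_aliases": "vuln_alias",
--         "campaign_names": "campaign",
--         "affected_products": "product",
--         "primary_actors": "actor",
--     }
--     buckets = {"cve": [], "vuln_alias": [], "campaign": [], "product": [], "actor": []}
--     for key, vals in sig.items():
--         if key in label:
--             buckets[label[key]] = vals or []
--     return [{"type": lab, "normalized_key": v} for lab, vs in buckets.items() for v in vs]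
-- ===== Notes on version B (the rewrite author's own statement) =====
-- stated objective: alternative
-- what changed: Instead of five hard-coded dict lookups each followed by an append loop, B makes one pass over sig.items() dispatching recognized fields into typed buckets and then one emission pass over the buckets; Pre_ only excludes Lean-side association lists whose recognized field keys repeat, which no Python dict can represent (first-vs-last match there is an artefact of the encoding).
import Mathlib
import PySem

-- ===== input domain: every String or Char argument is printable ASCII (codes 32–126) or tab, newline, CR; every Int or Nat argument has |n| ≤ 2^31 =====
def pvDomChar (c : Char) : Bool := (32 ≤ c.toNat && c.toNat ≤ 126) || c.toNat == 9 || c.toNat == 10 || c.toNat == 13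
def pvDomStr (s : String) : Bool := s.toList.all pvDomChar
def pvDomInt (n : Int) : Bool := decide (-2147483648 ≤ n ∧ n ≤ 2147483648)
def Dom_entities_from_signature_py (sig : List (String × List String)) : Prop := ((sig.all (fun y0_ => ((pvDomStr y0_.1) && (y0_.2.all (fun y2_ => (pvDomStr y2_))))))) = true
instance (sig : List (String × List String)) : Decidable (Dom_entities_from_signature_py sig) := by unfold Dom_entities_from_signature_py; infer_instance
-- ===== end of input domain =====

-- B: one pass over the signature's own items dispatching into typed buckets, then one emission pass — replaces A's five per-field lookups+loops (alternative decomposition, same cost).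
-- ===== PORT A =====
def entities_from_signature_py (sig : List (String × List String)) : List (List (String × String)) :=
  let entities : List (List (String × String)) := []
  let entities := (PySem.Dict.getD (PySem.Dict.mk sig) "cve_ids" []).foldl
    (fun acc cve => acc ++ [[("type", "cve"), ("normalized_key", cve)]]) entities
  let entities := (PySem.Dict.getD (PySem.Dict.mk sig) "vuln_aliases" []).foldl
    (fun acc al => acc ++ [[("type", "vuln_alias"), ("normalized_key", al)]]) entities
  let entities := (PySem.Dict.getD (PySem.Dict.mk sig) "campaign_names" []).foldl
    (fun acc campaign => acc ++ [[("type", "campaign"), ("normalized_key", campaign)]]) entities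
  let entities := (PySem.Dict.getD (PySem.Dict.mk sig) "affected_products" []).foldl
    (fun acc product => acc ++ [[("type", "product"), ("normalized_key", product)]]) entities
  let entities := (PySem.Dict.getD (PySem.Dict.mk sig) "primary_actors" []).foldl
    (fun acc actor => acc ++ [[("type", "actor"), ("normalized_key", actor)]]) entities
  entities

-- ===== PORT B =====
-- buckets = {"cve": [], "vuln_alias": [], "campaign": [], "product": [], "actor": []}
structure PvBuckets where
  cve : List String
  va : List String
  camp : List String
  prod : List String
  act : List String
deriving DecidableEq, Repr

-- one loop iteration: `if key in label: buckets[label[key]] = vals or []`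
-- (vals : List String, so `vals or []` is vals itself: an empty list is already []).
def pvStep (b : PvBuckets) (p : String × List String) : PvBuckets :=
  if p.1 == "cve_ids" then { b with cve := p.2 }
  else if p.1 == "vuln_aliases" then { b with va := p.2 }
  else if p.1 == "campaign_names" then { b with camp := p.2 }
  else if p.1 == "affected_products" then { b with prod := p.2 }
  else if p.1 == "primary_actors" then { b with act := p.2 }
  else b

-- the emission comprehension for one bucket
def pvEmit (lab : String) (vs : List String) : List (List (String × String)) :=
  vs.map (fun v => [("type", lab), ("normalized_key", v)])

def entities_from_signature_py_alt (sig : List (String × List String)) : List (List (String × String)) :=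
  let b := sig.foldl pvStep ⟨[], [], [], [], []⟩
  pvEmit "cve" b.cve ++ pvEmit "vuln_alias" b.va ++ pvEmit "campaign" b.camp
    ++ pvEmit "product" b.prod ++ pvEmit "actor" b.act

-- ===== PRECONDITION & SPEC =====
def pvRelevant (k : String) : Bool :=
  k == "cve_ids" || k == "vuln_aliases" || k == "campaign_names"
    || k == "affected_products" || k == "primary_actors"

-- Pre_ excludes only Lean-side association lists in which a recognized field key occurs twice:
-- a Python dict cannot contain duplicate keys, so no Python input is excluded; on such encodings
-- first-vs-last match is an accident of the encoding (A reads the first, B keeps the last).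
def Pre_entities_from_signature_py (sig : List (String × List String)) : Prop :=
  ((sig.map Prod.fst).filter pvRelevant).Nodup
instance (sig : List (String × List String)) : Decidable (Pre_entities_from_signature_py sig) := by
  unfold Pre_entities_from_signature_py; infer_instance

def pvWitness_entities_from_signature_py : (List (String × List String)) :=
  [("cve_ids", ["CVE-2024-1"]), ("primary_actors", ["apt1"]), ("other", ["x"])]

def Spec_entities_from_signature_py (sig : List (String × List String)) (out : List (List (String × String))) : Prop := out = entities_from_signature_py_alt sig
instance (sig : List (String × List String)) (out : List (List (String × String))) : Decidable (Spec_entities_from_signature_py sig out) := by unfold Spec_entities_from_signature_py; infer_instance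

-- ===== CLAIM =====
def Claim_equal_entities_from_signature_py : Prop := ∀ (sig : List (String × List String)), Dom_entities_from_signature_py sig → Pre_entities_from_signature_py sig → Spec_entities_from_signature_py sig (entities_from_signature_py sig)

-- ===== LEMMAS AND PROOFS =====

-- first-match lookup into sig, with default d
def pvG (sig : List (String × List String)) (k : String) (d : List String) : List String :=
  ((PySem.Dict.mk sig).get? k).getD d

lemma pvG_nil (k : String) (d : List String) : pvG [] k d = d := rfl

lemma pv_foldl_spec (sig : List (String × List String))
    (h : Pre_entities_from_signature_py sig) (b : PvBuckets) :
    sig.foldl pvStep b =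
      ⟨pvG sig "cve_ids" b.cve, pvG sig "vuln_aliases" b.va, pvG sig "campaign_names" b.camp,
       pvG sig "affected_products" b.prod, pvG sig "primary_actors" b.act⟩ := by
  induction sig generalizing b with
  | nil => simp [pvG_nil]
  | cons p rest ih =>
    obtain ⟨k, v⟩ := p
    unfold Pre_entities_from_signature_py at h
    simp only [List.map_cons, List.filter_cons] at h
    by_cases hrel : pvRelevant k = true
    · rw [if_pos hrel] at h
      have hnodup := h.of_cons
      have hkout : k ∉ rest.map Prod.fst := by
        intro hmem
        exact (List.nodup_cons.1 h).1 (List.mem_filter.2 ⟨hmem, hrel⟩)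
      have ihr := ih hnodup
      -- case on which of the five fields k is
      simp only [pvRelevant, Bool.or_eq_true, beq_iff_eq] at hrel
      rcases hrel with ((((hk | hk) | hk) | hk) | hk) <;> subst hk <;>
        simp_all [List.foldl_cons, pvStep, pvG, PySem.Dict.get?_mk_cons,
          (PySem.Dict.get?_eq_none_iff_not_mem_keys (PySem.Dict.mk rest) _).2
            (by simpa [PySem.Dict.keys_mk] using hkout)]
    · rw [if_neg hrel] at h
      have ihr := ih h b
      have hne : ∀ t, pvRelevant t = true → (k == t) = false := by
        intro t ht
        by_contra hc
        simp only [Bool.not_eq_false, beq_iff_eq] at hc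
        exact hrel (hc ▸ ht)
      simp only [List.foldl_cons]
      rw [show pvStep b (k, v) = b by
        simp only [pvStep]
        rw [if_neg, if_neg, if_neg, if_neg, if_neg] <;>
          simp_all [pvRelevant]]
      rw [ihr]
      simp only [pvG, PySem.Dict.get?_mk_cons]
      rw [hne "cve_ids" (by decide), hne "vuln_aliases" (by decide),
        hne "campaign_names" (by decide), hne "affected_products" (by decide),
        hne "primary_actors" (by decide)]
      simp

lemma pv_getD_eq_pvG (sig : List (String × List String)) (k : String) :
    PySem.Dict.getD (PySem.Dict.mk sig) k [] = pvG sig k [] := by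
  rw [PySem.Dict.getD_eq_get?_getD]; rfl

-- ===== VERDICT =====
theorem entities_from_signature_py_spec : Claim_equal_entities_from_signature_py := by
  intro sig _ hpre
  show entities_from_signature_py sig = entities_from_signature_py_alt sig
  simp only [entities_from_signature_py, entities_from_signature_py_alt,
    PySem.List.foldl_append_singleton_eq_map, List.nil_append, List.append_assoc,
    pv_foldl_spec sig hpre, pv_getD_eq_pvG, pvEmit]
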